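-- pv_equiv track=rewrite | github.com/AgustinVb/Heuristicas | grasp-aleatorio.py | expand_route
-- ===== SOURCE A (Python) =====
-- def reconstruct_path(parent, u, v):
--     if u == v:
--         return [u]
--     if parent[u][v] is None:
--         return []
--     path = []
--     cur = v
--     while cur is not None and cur != u:
--         path.append(cur)
--         cur = parent[u][cur]
--     if cur is None:
--         return []
--     path.append(u)
--     return path[::-1]
--
-- def expand_route(route, parent):
--     expanded = []
--     for i in range(len(route)-1):
--         u = route[i]
--         v = route[i+1]
--         segment = reconstruct_path(parent, u, v)
--         if not segment:
--             return []
--         if i > 0: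
--             segment = segment[1:]
--         expanded.extend(segment)
--     return expanded
-- ===== SOURCE B (Python) =====
-- def _segment(parent, u, v):
--     # forward-building recursion over the parent chain: [u, ..., v], or [] on failure
--     if u == v:
--         return [u]
--     row = parent[u]
--
--     def go(w):
--         if w == u:
--             return [u]
--         p = row[w]
--         if p is None:
--             return []
--         sub = go(p)
--         return sub + [w] if sub else []
--
--     return go(v)
--
--
-- def expand_route(route, parent):
--     pieces = []
--     first = True
--     for u, v in zip(route, route[1:]):
--         seg = _segment(parent, u, v)
--         if not seg:
--             return []
--         pieces.append(seg if first else seg[1:])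
--         first = False
--     return [x for p in pieces for x in p]
-- ===== Notes on version B (the rewrite author's own statement) =====
-- stated objective: alternative
-- what changed: reconstruct_path's backward while-walk with append-then-reverse is replaced by a forward-building recursion over the parent chain (base [u], append w after the recursive prefix), and expand_route's index loop with extend is replaced by a zip over adjacent pairs that collects trimmed pieces and flattens them at the end
import Mathlib
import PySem

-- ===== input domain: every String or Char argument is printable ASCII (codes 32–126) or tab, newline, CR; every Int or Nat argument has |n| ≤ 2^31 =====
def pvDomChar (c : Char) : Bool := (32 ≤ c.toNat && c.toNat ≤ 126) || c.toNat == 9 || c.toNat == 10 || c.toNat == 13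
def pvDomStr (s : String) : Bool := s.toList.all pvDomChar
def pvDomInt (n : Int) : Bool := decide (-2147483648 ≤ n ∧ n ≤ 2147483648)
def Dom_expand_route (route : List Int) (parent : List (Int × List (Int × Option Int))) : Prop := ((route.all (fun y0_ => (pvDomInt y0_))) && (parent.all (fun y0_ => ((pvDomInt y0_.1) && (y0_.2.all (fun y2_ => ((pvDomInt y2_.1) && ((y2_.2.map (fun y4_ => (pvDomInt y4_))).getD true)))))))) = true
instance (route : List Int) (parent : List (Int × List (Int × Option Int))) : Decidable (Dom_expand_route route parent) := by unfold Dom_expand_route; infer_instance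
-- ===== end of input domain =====

-- B rebuilds each segment by a forward-building recursion over the parent chain (instead of
-- A's backward while-walk plus reversal) and collects trimmed pieces over zipped adjacent
-- pairs, flattened at the end; B returns A's value on every input on which A returns.

-- ===== PORT A =====
-- the while loop of reconstruct_path: cur : Option Int (None ↔ Python's None); fuel only
-- makes the loop total — where Python A returns it never runs out (on a cyclic chain Python
-- diverges, on a missing key it raises KeyError; both are outside Pre_ below)
def pvLoopA (inner : List (Int × Option Int)) (u : Int) :
    Nat → List Int → Option Int → List Int
  | 0, _, _ => []                                   -- fuel exhausted: Python diverges here (outside Pre_)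
  | fuel + 1, path, cur =>
    match cur with
    | none => []                                    -- `if cur is None: return []`
    | some c =>
      if c = u then (path ++ [u]).reverse           -- loop exit `cur == u`; append u; path[::-1]
      else
        match (PySem.Dict.mk inner).get? c with
        | none => []                                -- KeyError `parent[u][cur]` (outside Pre_)
        | some nxt => pvLoopA inner u fuel (path ++ [c]) nxt

-- reconstruct_path(parent, u, v) (parent[u] is looked up once; Python re-reads the same row)
def pvReconA (parent : List (Int × List (Int × Option Int))) (u v : Int) : List Int :=
  if u = v then [u]
  else
    match (PySem.Dict.mk parent).get? u with
    | none => []                                    -- KeyError `parent[u]` (outside Pre_)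
    | some inner =>
      match (PySem.Dict.mk inner).get? v with
      | none => []                                  -- KeyError `parent[u][v]` (outside Pre_)
      | some pv =>
        if pv = none then []                        -- `if parent[u][v] is None: return []`
        else pvLoopA inner u (inner.length + 1) [] (some v)

-- the `for i in range(len(route)-1)` loop of expand_route, with early return on an empty segment
def pvGoA (route : List Int) (parent : List (Int × List (Int × Option Int))) :
    List Int → List Int → List Int
  | [], acc => acc
  | i :: rest, acc =>
    let u := PySem.List.pyGetD route i 0            -- route[i]  (always in range here)
    let v := PySem.List.pyGetD route (i + 1) 0      -- route[i+1]
    let seg := pvReconA parent u v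
    if seg = [] then []                             -- `if not segment: return []`
    else pvGoA route parent rest (acc ++ (if 0 < i then seg.drop 1 else seg))

def expand_route (route : List Int) (parent : List (Int × List (Int × Option Int))) : List Int :=
  pvGoA route parent (PySem.List.pyRange 0 ((route.length : Int) - 1) 1) []

-- ===== PORT B =====
-- Source B's inner `go`: forward-building recursion over the parent chain; fuel = recursion
-- depth bound, only to make it total (Python B overflows only where A diverges, outside Pre_)
def pvGoB (row : List (Int × Option Int)) (u : Int) : Nat → Int → List Int
  | 0, _ => []                                      -- recursion depth exhausted (outside Pre_)
  | fuel + 1, w =>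
    if w = u then [u]
    else
      match (PySem.Dict.mk row).get? w with
      | none => []                                  -- KeyError `row[w]` (outside Pre_)
      | some none => []                             -- `if p is None: return []`
      | some (some p) =>
        let sub := pvGoB row u fuel p
        if sub = [] then [] else sub ++ [w]

-- Source B's _segment
def pvSegB (parent : List (Int × List (Int × Option Int))) (u v : Int) : List Int :=
  if u = v then [u]
  else
    match (PySem.Dict.mk parent).get? u with
    | none => []                                    -- KeyError `parent[u]` (outside Pre_)
    | some row => pvGoB row u (row.length + 1) v

-- Source B's for-loop over zipped pairs, collecting trimmed pieces; `return []` ↦ none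
def pvPiecesB (parent : List (Int × List (Int × Option Int))) :
    List (Int × Int) → Bool → Option (List (List Int))
  | [], _ => some []
  | (u, v) :: rest, first =>
    let seg := pvSegB parent u v
    if seg = [] then none
    else
      match pvPiecesB parent rest false with
      | none => none
      | some ps => some ((if first then seg else seg.drop 1) :: ps)

def expand_route_alt (route : List Int) (parent : List (Int × List (Int × Option Int))) : List Int :=
  match pvPiecesB parent (route.zip route.tail) true with
  | none => []
  | some ps => ps.flatMap id                        -- `[x for p in pieces for x in p]`

-- ===== PRECONDITION & SPEC =====
-- one step of the parent-pointer map: a walking state is either a current key (inl w) or a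
-- settled outcome (inr): some true = the chain reached u (the segment is nonempty),
-- some false = it reached a None pointer (A returns [] for this pair at once),
-- none = a looked-up key is missing (KeyError)
def pvStep (row : List (Int × Option Int)) (u : Int) :
    Int ⊕ Option Bool → Int ⊕ Option Bool
  | .inr r => .inr r
  | .inl w =>
    if w = u then .inr (some true)
    else
      match (PySem.Dict.mk row).get? w with
      | none => .inr none
      | some none => .inr (some false)
      | some (some p) => .inl p

-- iterate the pointer map from v at most (#entries of the row) + 1 times: a chain that has
-- not settled by then revisits a key, i.e. it is cyclic and A loops forever
def pvResolve (row : List (Int × Option Int)) (u v : Int) : Option Bool :=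
  match (List.range (row.length + 1)).foldl (fun st _ => pvStep row u st) (Sum.inl v) with
  | .inl _ => none
  | .inr r => r

def pvSegStatus (parent : List (Int × List (Int × Option Int))) (u v : Int) : Option Bool :=
  if u = v then some true
  else
    match (PySem.Dict.mk parent).get? u with
    | none => none                                  -- KeyError `parent[u]`
    | some row => pvResolve row u v

-- Pre_ holds exactly on the inputs where Python A returns normally: taking the adjacent
-- pairs of the route in order, every pair's parent chain settles on u, up to a first pair
-- whose chain settles on a None pointer (there A returns [] and the later pairs are
-- unconstrained); excluded are exactly the inputs where A raises KeyError (a missing key)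
-- or loops forever (a cyclic chain).  The equivalence proof below does not need Pre_ — the
-- totalized ports agree on EVERY input — Pre_ only delimits the inputs on which the ports
-- model the Pythons (elsewhere A raises or diverges, and B raises likewise).
def Pre_expand_route (route : List Int) (parent : List (Int × List (Int × Option Int))) : Prop :=
  (match ((route.zip route.tail).map (fun p => pvSegStatus parent p.1 p.2)).dropWhile
      (fun s => s == some true) with
   | [] => true
   | s :: _ => s == some false) = true

instance (route : List Int) (parent : List (Int × List (Int × Option Int))) : Decidable (Pre_expand_route route parent) := by
  unfold Pre_expand_route; infer_instance

def pvWitness_expand_route : List Int × (List (Int × List (Int × Option Int))) :=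
  ([0, 2], [(0, [(1, some 0), (2, some 1)])])

def Spec_expand_route (route : List Int) (parent : List (Int × List (Int × Option Int))) (out : List Int) : Prop := out = expand_route_alt route parent
instance (route : List Int) (parent : List (Int × List (Int × Option Int))) (out : List Int) : Decidable (Spec_expand_route route parent out) := by unfold Spec_expand_route; infer_instance

-- ===== CLAIM (what is proved, stated in full; the proofs are below) =====
def Claim_equal_expand_route : Prop := ∀ (route : List Int) (parent : List (Int × List (Int × Option Int))), Dom_expand_route route parent → Pre_expand_route route parent → Spec_expand_route route parent (expand_route route parent)

-- ===== LEMMAS AND PROOFS =====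

-- A's backward walk with accumulator `path` against B's forward recursion, at EQUAL fuel:
-- both follow the same pointer chain, so they agree step by step on every input
lemma pv_chain (row : List (Int × Option Int)) (u : Int) :
    ∀ (f : Nat) (path : List Int) (w : Int),
      pvLoopA row u f path (some w) =
        (if pvGoB row u f w = [] then [] else pvGoB row u f w ++ path.reverse) := by
  intro f
  induction f with
  | zero => intro path w; simp [pvLoopA, pvGoB]
  | succ f ih =>
    intro path w
    by_cases hwu : w = u
    · subst hwu; simp [pvLoopA, pvGoB]
    · match hget : (PySem.Dict.mk row).get? w with
      | none => simp [pvLoopA, pvGoB, hwu, hget]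
      | some none =>
        -- the pointer is None: A's next iteration exits with [], B returns [] at once
        have hA : pvLoopA row u f (path ++ [w]) none = [] := by
          cases f <;> simp [pvLoopA]
        simp [pvLoopA, pvGoB, hwu, hget, hA]
      | some (some p) =>
        have hA : pvLoopA row u (f + 1) path (some w) =
            pvLoopA row u f (path ++ [w]) (some p) := by
          simp [pvLoopA, hwu, hget]
        have hB : pvGoB row u (f + 1) w =
            (if pvGoB row u f p = [] then [] else pvGoB row u f p ++ [w]) := by
          simp [pvGoB, hwu, hget]
        rw [hA, hB, ih (path ++ [w]) p]
        by_cases hsub : pvGoB row u f p = []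
        · simp [hsub]
        · simp [hsub]

-- per adjacent pair: A's segment equals B's segment, on every input
lemma pv_seg_eq (parent : List (Int × List (Int × Option Int))) (u v : Int) :
    pvReconA parent u v = pvSegB parent u v := by
  by_cases huv : u = v
  · simp [pvReconA, pvSegB, huv]
  · unfold pvReconA pvSegB
    simp only [if_neg huv]
    match hrow : (PySem.Dict.mk parent).get? u with
    | none => rfl
    | some row =>
      match hget : (PySem.Dict.mk row).get? v with
      | none =>
        -- KeyError parent[u][v]: A returns []; B's first recursion step hits the same lookup
        simp [pvGoB, Ne.symm huv, hget]
      | some none =>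
        -- parent[u][v] is None: A returns [] directly, B's first step also returns []
        simp [pvGoB, Ne.symm huv, hget]
      | some (some p) =>
        -- a real pointer: one unfolding on each side, then the chain lemma at equal fuel
        have hB : pvGoB row u (row.length + 1) v =
            (if pvGoB row u row.length p = [] then []
             else pvGoB row u row.length p ++ [v]) := by
          simp [pvGoB, Ne.symm huv, hget]
        have hA : pvLoopA row u (row.length + 1) [] (some v) =
            pvLoopA row u row.length [v] (some p) := by
          simp [pvLoopA, Ne.symm huv, hget]
        simp only [hget, hB, hA, pv_chain row u row.length [v] p]
        by_cases hsub : pvGoB row u row.length p = []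
        · simp [hsub]
        · simp [hsub]

-- A's index loop from position i against B's piece recursion on the dropped pair list;
-- the `first` flag of B corresponds to A's test `i > 0`
lemma pv_outer (route : List Int) (parent : List (Int × List (Int × Option Int))) :
    ∀ (t i : Nat) (acc : List Int), (route.zip route.tail).length - i = t →
      pvGoA route parent (PySem.List.pyRange (i : Int) ((route.length : Int) - 1) 1) acc =
        (match pvPiecesB parent ((route.zip route.tail).drop i) (i == 0) with
         | none => []
         | some ps => acc ++ ps.flatMap id) := by
  intro t
  induction t with
  | zero =>
    intro i acc ht
    have hzlen : (route.zip route.tail).length = min route.length (route.length - 1) := by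
      simp [List.length_zip]
    have hrange : PySem.List.pyRange (i : Int) ((route.length : Int) - 1) 1 = [] := by
      apply PySem.List.pyRange_one_eq_nil
      omega
    have hdrop : (route.zip route.tail).drop i = [] :=
      List.drop_eq_nil_of_le (by omega)
    rw [hrange, hdrop]
    simp [pvGoA, pvPiecesB]
  | succ t ih =>
    intro i acc ht
    have hzlen : (route.zip route.tail).length = min route.length (route.length - 1) := by
      simp [List.length_zip]
    have hjlt : i < (route.zip route.tail).length := by omega
    have hlt0 : i < route.length := by omega
    have hj1 : i + 1 < route.length := by omega
    have hrange : PySem.List.pyRange (i : Int) ((route.length : Int) - 1) 1 =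
        (i : Int) :: PySem.List.pyRange ((i : Int) + 1) ((route.length : Int) - 1) 1 :=
      PySem.List.pyRange_one_cons (by omega)
    have hu : PySem.List.pyGetD route (i : Int) 0 = route[i]'hlt0 := by
      rw [PySem.List.pyGetD_natCast]
      exact List.getD_eq_getElem route 0 hlt0
    have hv : PySem.List.pyGetD route ((i : Int) + 1) 0 = route[i + 1]'hj1 := by
      have : ((i : Int) + 1) = ((i + 1 : Nat) : Int) := by push_cast; ring
      rw [this, PySem.List.pyGetD_natCast]
      exact List.getD_eq_getElem route 0 hj1
    have hpair : (route.zip route.tail)[i]'hjlt = (route[i]'hlt0, route[i + 1]'hj1) := by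
      rw [List.getElem_zip]
      congr 1
      exact List.getElem_tail _
    have hdrop : (route.zip route.tail).drop i =
        (route[i]'hlt0, route[i + 1]'hj1) :: (route.zip route.tail).drop (i + 1) := by
      rw [List.drop_eq_getElem_cons hjlt, hpair]
    rw [hrange, hdrop]
    simp only [pvGoA, hu, hv, pv_seg_eq parent]
    by_cases hseg : pvSegB parent route[i] route[i + 1] = []
    · simp [pvPiecesB, hseg]
    · rw [if_neg hseg,
        show ((i : Int) + 1) = ((i + 1 : Nat) : Int) by push_cast; ring,
        ih (i + 1) (acc ++ (if (0 : Int) < (i : Int) then (pvSegB parent route[i] route[i + 1]).drop 1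
          else pvSegB parent route[i] route[i + 1])) (by omega)]
      simp only [pvPiecesB, if_neg hseg]
      match pvPiecesB parent ((route.zip route.tail).drop (i + 1)) false with
      | none => simp
      | some ps =>
        by_cases hi : i = 0
        · simp [hi]
        · simp [hi, List.append_assoc]

-- ===== VERDICT (by name: the statement is the Claim_ definition above) =====
theorem expand_route_spec : Claim_equal_expand_route := by
  intro route parent _ _
  unfold Spec_expand_route expand_route expand_route_alt
  have h := pv_outer route parent (route.zip route.tail).length 0 [] (by omega)
  rw [show ((0 : Nat) : Int) = (0 : Int) by norm_num] at h
  rw [h]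
  simp only [List.drop_zero]
  match pvPiecesB parent (route.zip route.tail) (0 == 0) with
  | none => rfl
  | some ps => simp
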